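-- pv_equiv track=rewrite | github.com/A-stick-bug/CCC-Solutions | INCOMPLETE CCC '11 S5 - Switch.py | check
-- ===== SOURCE A (Python) =====
-- def check(state):  # helper function to check if all lights in current state can be turned off
--     count = 0
--     for light in state:
--         if light:
--             count += 1
--         elif count < 4:
--             return False
--         else:
--             count = 0
--     return True
-- ===== SOURCE B (Python) =====
-- def check(state):
--     # Phase 1: compress into runs of (is_on, length), grouping by truthiness.
--     runs = []
--     cur_key = None
--     cur_len = 0
--     for light in state:
--         k = bool(light)
--         if k == cur_key:
--             cur_len += 1
--         else:
--             if cur_len: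
--                 runs.append((cur_key, cur_len))
--             cur_key = k
--             cur_len = 1
--     if cur_len:
--         runs.append((cur_key, cur_len))
--     # Phase 2: validate the runs.
--     prev = 0
--     for key, n in runs:
--         if key:
--             prev = n
--         elif n >= 2 or prev < 4:
--             return False
--     return True
-- ===== Notes on version B (the rewrite author's own statement) =====
-- stated objective: alternative
-- what changed: Replaces A's single-pass incremental counter with early return by a two-phase decomposition: first compress the input into runs of (truthiness, length), then validate the run list (an off-run fails iff its length is >= 2 or the preceding on-run is shorter than 4).
import Mathlib
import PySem

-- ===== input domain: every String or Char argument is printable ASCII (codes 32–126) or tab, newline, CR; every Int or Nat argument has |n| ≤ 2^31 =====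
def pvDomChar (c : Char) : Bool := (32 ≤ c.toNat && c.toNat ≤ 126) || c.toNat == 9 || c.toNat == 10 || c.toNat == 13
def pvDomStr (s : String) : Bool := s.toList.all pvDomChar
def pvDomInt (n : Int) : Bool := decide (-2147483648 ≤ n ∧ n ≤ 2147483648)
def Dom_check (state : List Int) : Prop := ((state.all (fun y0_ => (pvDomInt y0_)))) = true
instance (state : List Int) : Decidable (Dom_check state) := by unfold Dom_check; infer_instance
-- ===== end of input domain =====

-- B replaces A's incremental counter with a two-phase decomposition (compress into truthiness runs, then validate the runs); objective: alternative, same cost.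

-- ===== PORT A =====
-- the loop over `state` with early return, counter `count`
def checkLoop : Int → List Int → Bool
  | _, [] => true
  | count, l :: ls =>
    if l ≠ 0 then checkLoop (count + 1) ls
    else if count < 4 then false
    else checkLoop 0 ls

def check (state : List Int) : Bool := checkLoop 0 state

-- ===== PORT B =====
-- phase 1 step: state = (runs, cur_key, cur_len)
def stepRun (st : List (Bool × Int) × Option Bool × Int) (light : Int) :
    List (Bool × Int) × Option Bool × Int :=
  let k := decide (light ≠ 0)
  match st with
  | (runs, curKey, curLen) =>
    if curKey = some k then (runs, curKey, curLen + 1)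
    else if curLen ≠ 0 then (runs ++ [(curKey.getD k, curLen)], some k, 1)
    else (runs, some k, 1)

-- final flush after the loop (`if cur_len: runs.append(...)`); curKey.getD is exact:
-- cur_key is never None when cur_len ≠ 0
def flushRuns (st : List (Bool × Int) × Option Bool × Int) : List (Bool × Int) :=
  match st with
  | (runs, curKey, curLen) =>
    if curLen ≠ 0 then runs ++ [(curKey.getD false, curLen)] else runs

def runsOf (state : List Int) : List (Bool × Int) :=
  flushRuns (state.foldl stepRun ([], none, 0))

-- phase 2: the validation loop over the runs, carrying `prev`
def checkRuns : Int → List (Bool × Int) → Bool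
  | _, [] => true
  | prev, (key, n) :: rest =>
    if key then checkRuns n rest
    else if n ≥ 2 ∨ prev < 4 then false
    else checkRuns prev rest

def check_alt (state : List Int) : Bool := checkRuns 0 (runsOf state)

-- ===== PRECONDITION & SPEC =====
def Spec_check (state : List Int) (out : Bool) : Prop := out = check_alt state
instance (state : List Int) (out : Bool) : Decidable (Spec_check state out) := by unfold Spec_check; infer_instance

-- ===== CLAIM (what is proved, stated in full; the proofs are below) =====
def Claim_equal_check : Prop := ∀ (state : List Int), Dom_check state → Spec_check state (check state)

-- ===== LEMMAS AND PROOFS =====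

-- reference (back-to-front) run compression, proof-only
def grp : List Int → List (Bool × Int)
  | [] => []
  | x :: xs =>
    match grp xs with
    | (b, m) :: rest =>
      if decide (x ≠ 0) = b then (b, m + 1) :: rest
      else (decide (x ≠ 0), 1) :: (b, m) :: rest
    | [] => [(decide (x ≠ 0), 1)]

-- grp prefixed with a pending run (b, n)
def grpFrom (b : Bool) (n : Int) (s : List Int) : List (Bool × Int) :=
  match grp s with
  | (b', m) :: rest => if b' = b then (b, m + n) :: rest else (b, n) :: (b', m) :: rest
  | [] => [(b, n)]

theorem grp_head_pos : ∀ (s : List Int) (b : Bool) (n : Int) (rest : List (Bool × Int)),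
    grp s = (b, n) :: rest → 1 ≤ n := by
  intro s
  induction s with
  | nil => intro b n rest h; simp [grp] at h
  | cons x xs ih =>
    intro b n rest h
    simp only [grp] at h
    cases hg : grp xs with
    | nil =>
      rw [hg] at h
      dsimp only at h
      simp only [List.cons.injEq, Prod.mk.injEq] at h
      omega
    | cons p r =>
      obtain ⟨b', m⟩ := p
      rw [hg] at h
      dsimp only at h
      by_cases hk : decide (x ≠ 0) = b'
      · rw [if_pos hk] at h
        simp only [List.cons.injEq, Prod.mk.injEq] at h
        have := ih b' m r hg
        omega
      · rw [if_neg hk] at h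
        simp only [List.cons.injEq, Prod.mk.injEq] at h
        omega

theorem grp_cons (x : Int) (xs : List Int) (k : Bool) (hk : decide (x ≠ 0) = k) :
    grp (x :: xs) = (match grp xs with
      | (b, m) :: rest => if k = b then (b, m + 1) :: rest else (k, 1) :: (b, m) :: rest
      | [] => [(k, 1)]) := by
  simp only [grp, hk]

theorem step_cons (runs : List (Bool × Int)) (b k : Bool) (n x : Int)
    (hk : decide (x ≠ 0) = k) (hn : 1 ≤ n) :
    stepRun (runs, some b, n) x =
      if k = b then (runs, some b, n + 1) else (runs ++ [(b, n)], some k, 1) := by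
  simp only [stepRun, hk]
  by_cases hb : k = b
  · subst hb
    rw [if_pos rfl, if_pos rfl]
  · rw [if_neg (by simp only [Option.some.injEq]; exact fun h => hb h.symm), if_neg hb,
      if_pos (by omega)]
    simp

theorem foldl_step_eq : ∀ (s : List Int) (runs : List (Bool × Int)) (b : Bool) (n : Int),
    1 ≤ n →
    flushRuns (s.foldl stepRun (runs, some b, n)) = runs ++ grpFrom b n s := by
  intro s
  induction s with
  | nil =>
    intro runs b n hn
    simp [flushRuns, grpFrom, grp]
    omega
  | cons x xs ih =>
    intro runs b n hn
    obtain ⟨k, hk⟩ : ∃ k, decide (x ≠ 0) = k := ⟨_, rfl⟩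
    rw [List.foldl_cons, step_cons runs b k n x hk hn]
    by_cases hb : k = b
    · subst hb
      rw [if_pos rfl, ih runs k (n + 1) (by omega)]
      congr 1
      simp only [grpFrom, grp_cons x xs k hk]
      cases hg : grp xs with
      | nil => simp; omega
      | cons p r =>
        obtain ⟨b', m⟩ := p
        by_cases hb' : k = b'
        · subst hb'
          simp
          omega
        · have h2 : ¬ b' = k := fun h => hb' h.symm
          simp [hb', h2]
          omega
    · rw [if_neg hb, ih _ k 1 (by omega), List.append_assoc]
      congr 1
      simp only [grpFrom, grp_cons x xs k hk]
      cases hg : grp xs with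
      | nil => simp [hb]
      | cons p r =>
        obtain ⟨b', m⟩ := p
        by_cases hb' : k = b'
        · subst hb'
          simp [hb]
        · have h2 : ¬ b' = k := fun h => hb' h.symm
          simp [hb', h2, hb]

theorem grpFrom_one (x : Int) (xs : List Int) (k : Bool) (hk : decide (x ≠ 0) = k) :
    grpFrom k 1 xs = grp (x :: xs) := by
  rw [grp_cons x xs k hk]
  simp only [grpFrom]
  cases hg : grp xs with
  | nil => rfl
  | cons p r =>
    obtain ⟨b', m⟩ := p
    by_cases hb : k = b'
    · subst hb
      simp
    · have h2 : ¬ b' = k := fun h => hb h.symm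
      simp [hb, h2]

theorem runsOf_eq_grp : ∀ (s : List Int), runsOf s = grp s := by
  intro s
  cases s with
  | nil => simp [runsOf, flushRuns, grp]
  | cons x xs =>
    have h0 : stepRun ([], none, 0) x = ([], some (decide (x ≠ 0)), 1) := by
      simp [stepRun]
    unfold runsOf
    rw [List.foldl_cons, h0, foldl_step_eq xs [] _ 1 (by omega), List.nil_append,
      grpFrom_one x xs _ rfl]

-- bridge: checkLoop with counter c equals checkRuns where a leading on-run absorbs c
def caux (c : Int) : List (Bool × Int) → Bool
  | (true, n) :: rest => checkRuns (c + n) rest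
  | gs => checkRuns c gs

theorem grp_eq_nil : ∀ (s : List Int), grp s = [] → s = [] := by
  intro s h
  cases s with
  | nil => rfl
  | cons x xs =>
    exfalso
    simp only [grp] at h
    cases hg : grp xs with
    | nil => rw [hg] at h; simp at h
    | cons p r =>
      obtain ⟨b, m⟩ := p
      rw [hg] at h
      split at h <;> (try split at h) <;> exact List.cons_ne_nil _ _ h

theorem checkLoop_eq_caux : ∀ (s : List Int) (c : Int), checkLoop c s = caux c (grp s) := by
  intro s
  induction s with
  | nil => intro c; rfl
  | cons x xs ih =>
    intro c
    by_cases hx : x ≠ 0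
    · have hk : decide (x ≠ 0) = true := by simp [hx]
      have hL : checkLoop c (x :: xs) = checkLoop (c + 1) xs := by
        simp [checkLoop, hx]
      rw [hL, ih (c + 1), grp_cons x xs true hk]
      cases hg : grp xs with
      | nil => simp [caux, checkRuns]
      | cons p r =>
        obtain ⟨b', m⟩ := p
        cases b' with
        | true =>
          simp only [caux]
          congr 1
          omega
        | false => simp [caux]
    · have hx0 : x = 0 := by omega
      subst hx0
      have hk : decide ((0 : Int) ≠ 0) = false := by simp
      have hL : checkLoop c (0 :: xs) = (if c < 4 then false else checkLoop 0 xs) := by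
        simp [checkLoop]
      rw [hL, grp_cons 0 xs false hk]
      cases hg : grp xs with
      | nil =>
        have hxs : xs = [] := grp_eq_nil xs hg
        subst hxs
        by_cases hc : c < 4 <;> simp [caux, checkRuns, checkLoop, hc]
      | cons p r =>
        obtain ⟨b', m⟩ := p
        cases b' with
        | true =>
          by_cases hc : c < 4
          · simp [caux, checkRuns, hc]
          · rw [if_neg hc, ih 0, hg]
            simp [caux, checkRuns, hc, show ¬(2 : Int) ≤ 1 by omega]
        | false =>
          have hm : 1 ≤ m := grp_head_pos xs false m r hg
          by_cases hc : c < 4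
          · simp [caux, checkRuns, hc]
          · rw [if_neg hc, ih 0, hg]
            simp [caux, checkRuns, hc, show (2 : Int) ≤ m + 1 by omega]

theorem check_alt_eq : ∀ (s : List Int), check_alt s = caux 0 (grp s) := by
  intro s
  unfold check_alt
  rw [runsOf_eq_grp]
  cases hg : grp s with
  | nil => rfl
  | cons p r =>
    obtain ⟨b, m⟩ := p
    cases b with
    | true => simp [caux, checkRuns]
    | false => simp [caux]

-- ===== VERDICT (by name: the statement is the Claim_ definition above) =====
theorem check_spec : Claim_equal_check := by
  intro state _
  unfold Spec_check
  rw [check_alt_eq, ← checkLoop_eq_caux]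
  rfl
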